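-- pv_equiv track=rewrite | github.com/SnowballHQ/data_enricher | utils/google_sheets_processor_fixed.py | _map_input_columns
-- ===== SOURCE A (Python) =====
-- from typing import Optional, Dict, List, Tuple
--
-- def _map_input_columns(headers: List[str]) -> Dict[str, str]:
--     """Map input columns based on header names - supports both Case A and Case B"""
--     column_mapping = {}
--
--     # Keywords mapping (Case A)
--     keywords_patterns = ['Company Keywords', 'keywords', 'Keywords', 'tags', 'Tags', 'keyword']
--     for i, header in enumerate(headers):
--         if header in keywords_patterns or any(pat.lower() in header.lower() for pat in ['keyword', 'tag']):
--             column_mapping['keywords'] = chr(ord('A') + i)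
--             break
--
--     # Description mapping (Case A)
--     desc_patterns = ['Company Short Description', 'description', 'Description', 'about', 'About', 'summary']
--     for i, header in enumerate(headers):
--         if header in desc_patterns or any(pat.lower() in header.lower() for pat in ['description', 'desc', 'about', 'summary']):
--             column_mapping['description'] = chr(ord('A') + i)
--             break
--
--     # Website mapping (Case B)
--     website_patterns = ['Website', 'website', 'URL', 'url', 'Web', 'web', 'Link', 'link', 'Homepage', 'homepage']
--     for i, header in enumerate(headers):
--         if header in website_patterns or any(pat.lower() in header.lower() for pat in ['website', 'url', 'web', 'link', 'homepage']):
--             column_mapping['website'] = chr(ord('A') + i)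
--             break
--
--     # Company name mapping (both Case A and Case B)
--     company_patterns = ['Company Name', 'company_name', 'name', 'Name', 'brand', 'Brand', 'company']
--     for i, header in enumerate(headers):
--         if header in company_patterns or any(pat.lower() in header.lower() for pat in ['company', 'name', 'brand']):
--             column_mapping['company_name'] = chr(ord('A') + i)
--             break
--
--     return column_mapping
-- ===== SOURCE B (Python) =====
-- from typing import Dict, List
--
-- _EXACT = {
--     'keywords': ['Company Keywords', 'keywords', 'Keywords', 'tags', 'Tags', 'keyword'],
--     'description': ['Company Short Description', 'description', 'Description', 'about', 'About', 'summary'],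
--     'website': ['Website', 'website', 'URL', 'url', 'Web', 'web', 'Link', 'link', 'Homepage', 'homepage'],
--     'company_name': ['Company Name', 'company_name', 'name', 'Name', 'brand', 'Brand', 'company'],
-- }
-- _SUB = {
--     'keywords': ['keyword', 'tag'],
--     'description': ['description', 'desc', 'about', 'summary'],
--     'website': ['website', 'url', 'web', 'link', 'homepage'],
--     'company_name': ['company', 'name', 'brand'],
-- }
--
-- def _map_input_columns(headers: List[str]) -> Dict[str, str]:
--     """Single sweep: remember the first matching column for each field, then emit in fixed order."""
--     kw = de = we = co = None
--     for i, header in enumerate(headers):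
--         col = chr(ord('A') + i)
--         h = header.lower()
--         if kw is None and (header in _EXACT['keywords'] or any(p in h for p in _SUB['keywords'])):
--             kw = col
--         if de is None and (header in _EXACT['description'] or any(p in h for p in _SUB['description'])):
--             de = col
--         if we is None and (header in _EXACT['website'] or any(p in h for p in _SUB['website'])):
--             we = col
--         if co is None and (header in _EXACT['company_name'] or any(p in h for p in _SUB['company_name'])):
--             co = col
--     out = {}
--     if kw is not None:
--         out['keywords'] = kw
--     if de is not None:
--         out['description'] = de
--     if we is not None:
--         out['website'] = we
--     if co is not None:
--         out['company_name'] = co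
--     return out
-- ===== Notes on version B (the rewrite author's own statement) =====
-- stated objective: simpler
-- what changed: Replaces A's four separate break-on-first-match scans over the headers with one pass that records the first matching column for each of the four fields in four optional accumulators, then emits the mapping in the same fixed field order.
import Mathlib
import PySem

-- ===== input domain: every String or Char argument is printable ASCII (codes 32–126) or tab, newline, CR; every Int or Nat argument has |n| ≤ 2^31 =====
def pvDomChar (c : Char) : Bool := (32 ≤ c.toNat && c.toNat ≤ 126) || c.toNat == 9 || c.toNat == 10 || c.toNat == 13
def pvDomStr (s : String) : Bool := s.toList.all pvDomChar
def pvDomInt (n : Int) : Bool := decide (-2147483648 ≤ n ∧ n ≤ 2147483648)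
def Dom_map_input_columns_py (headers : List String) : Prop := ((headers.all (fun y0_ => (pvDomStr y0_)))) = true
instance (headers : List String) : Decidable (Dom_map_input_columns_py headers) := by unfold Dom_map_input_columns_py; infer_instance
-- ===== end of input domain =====

-- B replaces A's four separate break-on-first-match scans of the headers by a single pass
-- keeping four optional accumulators (objective: simpler, same O(n) cost).


-- ===== PORT A =====
-- chr(ord('A') + i)
def pvChrA (i : Nat) : String := String.mk [Char.ofNat (65 + i)]

-- `header in patterns or any(pat.lower() in header.lower() for pat in subs)`
def pvMatchA (exacts subs : List String) (header : String) : Bool :=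
  exacts.contains header ||
    subs.any (fun pat => PySem.Str.isIn (PySem.Str.lower pat) (PySem.Str.lower header))

-- one `for i, header in enumerate(headers): if match: ... ; break` loop
def pvScanA (exacts subs : List String) : List String → Nat → Option String
  | [], _ => none
  | header :: rest, i =>
      if pvMatchA exacts subs header then some (pvChrA i)
      else pvScanA exacts subs rest (i + 1)

def map_input_columns_py (headers : List String) : List (String × String) :=
  let d : PySem.Dict String String := PySem.Dict.empty
  let d := match pvScanA ["Company Keywords", "keywords", "Keywords", "tags", "Tags", "keyword"]
                         ["keyword", "tag"] headers 0 with
           | some c => d.insert "keywords" c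
           | none => d
  let d := match pvScanA ["Company Short Description", "description", "Description", "about", "About", "summary"]
                         ["description", "desc", "about", "summary"] headers 0 with
           | some c => d.insert "description" c
           | none => d
  let d := match pvScanA ["Website", "website", "URL", "url", "Web", "web", "Link", "link", "Homepage", "homepage"]
                         ["website", "url", "web", "link", "homepage"] headers 0 with
           | some c => d.insert "website" c
           | none => d
  let d := match pvScanA ["Company Name", "company_name", "name", "Name", "brand", "Brand", "company"]
                         ["company", "name", "brand"] headers 0 with
           | some c => d.insert "company_name" c
           | none => d
  d.items

-- ===== PORT B =====
def pvBKwExact : List String := ["Company Keywords", "keywords", "Keywords", "tags", "Tags", "keyword"]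
def pvBKwSub : List String := ["keyword", "tag"]
def pvBDeExact : List String := ["Company Short Description", "description", "Description", "about", "About", "summary"]
def pvBDeSub : List String := ["description", "desc", "about", "summary"]
def pvBWeExact : List String := ["Website", "website", "URL", "url", "Web", "web", "Link", "link", "Homepage", "homepage"]
def pvBWeSub : List String := ["website", "url", "web", "link", "homepage"]
def pvBCoExact : List String := ["Company Name", "company_name", "name", "Name", "brand", "Brand", "company"]
def pvBCoSub : List String := ["company", "name", "brand"]

def pvChrB (i : Nat) : String := String.mk [Char.ofNat (65 + i)]

-- `header in exacts or any(p in h for p in subs)` (h = header.lower(), subs already lowercase)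
def pvMatchB (header h : String) (exacts subs : List String) : Bool :=
  exacts.contains header || subs.any (fun p => PySem.Str.isIn p h)

-- the single `for i, header in enumerate(headers)` loop over the four accumulators
def pvLoopB : List String → Nat → Option String → Option String → Option String → Option String →
    Option String × Option String × Option String × Option String
  | [], _, kw, de, we, co => (kw, de, we, co)
  | header :: rest, i, kw, de, we, co =>
      let col := pvChrB i
      let h := PySem.Str.lower header
      let kw := if kw.isNone && pvMatchB header h pvBKwExact pvBKwSub then some col else kw
      let de := if de.isNone && pvMatchB header h pvBDeExact pvBDeSub then some col else de
      let we := if we.isNone && pvMatchB header h pvBWeExact pvBWeSub then some col else we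
      let co := if co.isNone && pvMatchB header h pvBCoExact pvBCoSub then some col else co
      pvLoopB rest (i + 1) kw de we co

def map_input_columns_py_alt (headers : List String) : List (String × String) :=
  match pvLoopB headers 0 none none none none with
  | (kw, de, we, co) =>
      let out : List (String × String) := []
      let out := match kw with | some c => out ++ [("keywords", c)] | none => out
      let out := match de with | some c => out ++ [("description", c)] | none => out
      let out := match we with | some c => out ++ [("website", c)] | none => out
      let out := match co with | some c => out ++ [("company_name", c)] | none => out
      out

-- ===== PRECONDITION & SPEC =====
def Spec_map_input_columns_py (headers : List String) (out : List (String × String)) : Prop := out = map_input_columns_py_alt headers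
instance (headers : List String) (out : List (String × String)) : Decidable (Spec_map_input_columns_py headers out) := by unfold Spec_map_input_columns_py; infer_instance

-- ===== CLAIM (what is proved, stated in full; the proofs are below) =====
def Claim_equal_map_input_columns_py : Prop := ∀ (headers : List String), Dom_map_input_columns_py headers → Spec_map_input_columns_py headers (map_input_columns_py headers)

-- ===== LEMMAS AND PROOFS =====

-- B's match test equals A's: the substring patterns are already lowercase literals.
lemma pvMatch_kw (h : String) :
    pvMatchB h (PySem.Str.lower h) pvBKwExact pvBKwSub =
      pvMatchA pvBKwExact pvBKwSub h := by
  simp only [pvMatchA, pvMatchB, pvBKwSub, List.any_cons, List.any_nil,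
    show PySem.Str.lower "keyword" = "keyword" by decide,
    show PySem.Str.lower "tag" = "tag" by decide]
lemma pvMatch_de (h : String) :
    pvMatchB h (PySem.Str.lower h) pvBDeExact pvBDeSub =
      pvMatchA pvBDeExact pvBDeSub h := by
  simp only [pvMatchA, pvMatchB, pvBDeSub, List.any_cons, List.any_nil,
    show PySem.Str.lower "description" = "description" by decide,
    show PySem.Str.lower "desc" = "desc" by decide,
    show PySem.Str.lower "about" = "about" by decide,
    show PySem.Str.lower "summary" = "summary" by decide]
lemma pvMatch_we (h : String) :
    pvMatchB h (PySem.Str.lower h) pvBWeExact pvBWeSub =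
      pvMatchA pvBWeExact pvBWeSub h := by
  simp only [pvMatchA, pvMatchB, pvBWeSub, List.any_cons, List.any_nil,
    show PySem.Str.lower "website" = "website" by decide,
    show PySem.Str.lower "url" = "url" by decide,
    show PySem.Str.lower "web" = "web" by decide,
    show PySem.Str.lower "link" = "link" by decide,
    show PySem.Str.lower "homepage" = "homepage" by decide]
lemma pvMatch_co (h : String) :
    pvMatchB h (PySem.Str.lower h) pvBCoExact pvBCoSub =
      pvMatchA pvBCoExact pvBCoSub h := by
  simp only [pvMatchA, pvMatchB, pvBCoSub, List.any_cons, List.any_nil,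
    show PySem.Str.lower "company" = "company" by decide,
    show PySem.Str.lower "name" = "name" by decide,
    show PySem.Str.lower "brand" = "brand" by decide]

lemma pvStepComp (k : Option String) (b : Bool) (c : String) (s : Option String) :
    (if k.isNone && b then some c else k).orElse (fun _ => s) =
      k.orElse (fun _ => if b then some c else s) := by
  cases k <;> cases b <;> simp [Option.orElse]

-- the single sweep computes, per field, exactly A's first-match scan
lemma pvLoopB_spec (hs : List String) : ∀ (i : Nat) (kw de we co : Option String),
    pvLoopB hs i kw de we co =
      (kw.orElse (fun _ => pvScanA pvBKwExact pvBKwSub hs i),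
       de.orElse (fun _ => pvScanA pvBDeExact pvBDeSub hs i),
       we.orElse (fun _ => pvScanA pvBWeExact pvBWeSub hs i),
       co.orElse (fun _ => pvScanA pvBCoExact pvBCoSub hs i)) := by
  induction hs with
  | nil =>
      intro i kw de we co
      cases kw <;> cases de <;> cases we <;> cases co <;>
        simp [pvLoopB, pvScanA, Option.orElse]
  | cons h rest ih =>
      intro i kw de we co
      simp only [pvLoopB]
      rw [ih]
      simp only [pvScanA, pvMatch_kw, pvMatch_de, pvMatch_we, pvMatch_co,
        show pvChrB = pvChrA from rfl]
      refine congrArg₂ Prod.mk ?_ (congrArg₂ Prod.mk ?_ (congrArg₂ Prod.mk ?_ ?_)) <;>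
        exact pvStepComp _ _ _ _

-- ===== VERDICT (by name: the statement is the Claim_ definition above) =====
theorem map_input_columns_py_spec : Claim_equal_map_input_columns_py := by
  intro headers _
  show map_input_columns_py headers = map_input_columns_py_alt headers
  unfold map_input_columns_py map_input_columns_py_alt
  rw [pvLoopB_spec]
  simp only [pvBKwExact, pvBKwSub, pvBDeExact, pvBDeSub, pvBWeExact, pvBWeSub,
    pvBCoExact, pvBCoSub]
  cases pvScanA ["Company Keywords", "keywords", "Keywords", "tags", "Tags", "keyword"]
      ["keyword", "tag"] headers 0 <;>
    cases pvScanA ["Company Short Description", "description", "Description", "about", "About", "summary"]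
        ["description", "desc", "about", "summary"] headers 0 <;>
      cases pvScanA ["Website", "website", "URL", "url", "Web", "web", "Link", "link", "Homepage", "homepage"]
          ["website", "url", "web", "link", "homepage"] headers 0 <;>
        cases pvScanA ["Company Name", "company_name", "name", "Name", "brand", "Brand", "company"]
            ["company", "name", "brand"] headers 0 <;>
          rfl
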